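-- pv_equiv track=rewrite | github.com/kristapskuznecovs/eis_helper | backend/src/app_template/modules/extraction/fetch_ckan_raw.py | resolve_resource_ids
-- ===== SOURCE A (Python) =====
-- RESOURCE_IDS: dict[str, dict[int, str]] = {
--     "results": {
--         2018: "cecd0be7-c8e0-451a-8314-f1d806db3bc1",
--         2019: "1d37ba16-4d7b-4c1e-9650-1ee9b6a32666",
--         2020: "abf811a3-26e8-48c2-bc86-e9b74ca0b385",
--         2021: "a1342945-ce4b-480b-abb5-b74d43c41534",
--         2022: "97a7c410-60c0-4d08-b554-4d1abb9092da",
--         2023: "71f88053-97c1-4928-93c3-8d83d714f27f",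
--         2024: "3a02a1a7-0322-4c0d-9700-8af9832f0f91",
--         2025: "79b34e1c-8989-4984-816a-8e8f92b701f3",
--         2026: "c4007411-1ba5-40f3-9b50-f25881c93f51",
--     },
--     "participants": {
--         2016: "8e77cc9e-554e-4bfb-8772-9dc0b7d24608",
--         2017: "7733be61-bca2-4ae8-8577-d948058df6c0",
--         2018: "e40819ee-3a84-4205-b64e-4c67263ac237",
--         2019: "7f23e4c6-9bee-4552-ba0c-a05be1f6ac62",
--         2020: "eb1ddcf9-e358-4ceb-a4d7-e406a0a60d7e",
--         2021: "25883190-97ef-45a1-9b89-d15cc418a644",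
--         2022: "4b9317d7-8495-4621-966d-48e00639e2cb",
--         2023: "7f4f7e75-8207-4ab1-9470-bcd0112653e9",
--         2024: "0bba780e-5ae3-4701-ab16-8f804d5a3e57",
--         2025: "4540cc38-0f5f-42a9-9749-3896c3da4488",
--         2026: "a45acd54-2e8f-4fb5-b757-31654e875563",
--     },
--     "amendments": {
--         2016: "792209b1-1465-41f9-b6e7-93878722c249",
--         2017: "92e512ed-013b-4757-ba19-56662630f6e6",
--         2018: "a1e67b0e-704a-4ca1-96dc-39c87d35c04e",
--         2019: "d5e7494f-6f7f-42a9-9683-3c855f3d00a1",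
--         2020: "3438f0eb-d7d2-4d0c-a1f2-e1d2420c848f",
--         2021: "ec6da601-c7f6-466e-9bcb-4efea45dab36",
--         2022: "4ad302df-c832-48e5-bd67-89d470ae43b3",
--         2023: "25b0c081-49d9-4bea-9e5f-ecac3573d6cb",
--         2024: "f8e2e074-e29e-409f-8fec-5d22c7b0bcd1",
--         2025: "f7b96bf6-2af8-446a-a6ee-6022601fef7c",
--         2026: "d9e4d487-1f1a-4b37-9735-e411708d7288",
--     },
--     "purchase_orders": {
--         2010: "a8f9c39c-5a68-4848-a6c6-57625f205c45",
--         2011: "8f3d230c-1bc7-40fa-b786-8b5ac89b8496",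
--         2012: "2ef44ded-5080-4c93-90af-a9e605c470c4",
--         2013: "c3d54b54-a2b4-4535-ac6a-40f264568648",
--         2014: "9031948a-c906-4614-8274-6a62de1eeaf4",
--         2015: "572a1153-371c-4a86-9cbe-a07b4a5a977a",
--         2016: "4a32f248-feb9-4f54-9243-d4d98ea9d024",
--         2017: "f50ac697-a3a1-453b-9fd0-c3ca16656092",
--         2018: "e3be0379-c7bf-4439-9443-ffc9881f79af",
--         2019: "227567af-fd4b-49df-8054-dba08676254e",
--         2020: "d31fbf99-2708-4558-9c83-d16e69a70e08",
--         2021: "bf623b89-ce86-4fc6-a2af-46c2c993074c",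
--         2022: "bad87d10-ef05-43fb-b9ba-9f0e7a761673",
--         2023: "d89f4745-77b0-47e4-9e8b-ec494dc3ad1b",
--         2024: "11f08c38-50f7-47f3-a700-4f60cd09d943",
--         2025: "226db975-8dc7-4f59-9f92-773ef9b58739",
--         2026: "a63a9503-d7f1-4840-8e53-0346ed0513a9",
--     },
--     "deliveries": {
--         2010: "cd17b62c-b7e5-416e-adcc-707e2b109a6f",
--         2011: "bb62ce35-46eb-49ed-8e95-474d0918dd65",
--         2012: "1c638795-cb24-4b57-a11a-124e48b274c0",
--         2013: "cba668cc-2535-458a-ac21-9022f0ded50f",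
--         2014: "cdd75d59-407b-4e7e-b4a2-834db2ee00f8",
--         2015: "cd1bd12c-7e52-40ee-b65b-66364a0c9120",
--         2016: "dc0f81fd-c48c-4740-b479-07b1218e7ef2",
--         2017: "78ca35ae-8ce7-4593-97ac-faf8348a18af",
--         2018: "7d152654-74c8-45af-a024-fdbd002fa706",
--         2019: "addf3381-f57e-40a7-82e7-e228fb121367",
--         2020: "fe5a1ee0-c228-46d8-9d2f-022d9aee1ae9",
--         2021: "ead3e185-b006-45f5-ace9-4fb2fc3c15ad",
--         2022: "99565544-1fd2-441d-b408-df33066a3867",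
--         2023: "b7cc1f82-10c7-45f1-ad22-d3339bf990ee",
--         2024: "041097af-09c4-4ce6-b427-ad6921456c71",
--         2025: "91f940ab-9132-40c0-aa8b-433ced22c17d",
--         2026: "c6aed1c6-94bc-4c83-936f-3c37648aca4b",
--     },
--     "buyers": {
--         0: "08a09865-b831-462a-a5ce-226f9293ff3e",  # single file, no year split
--     },
-- }
--
-- def resolve_resource_ids(dataset: str, from_year: int, to_year: int) -> list[tuple[int, str]]:
--     """Return [(year, resource_id)] for the given year range, skipping TODO placeholders."""
--     mapping = RESOURCE_IDS.get(dataset, {})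
--     if dataset == "buyers":
--         return [(0, mapping[0])]
--     result = []
--     for year, rid in sorted(mapping.items()):
--         if year == 0:
--             continue
--         if from_year <= year <= to_year and not rid.startswith("TODO"):
--             result.append((year, rid))
--     return result
-- ===== SOURCE B (Python) =====
-- SPANS: dict[str, tuple[int, list[str]]] = {
--     "results": (2018, [
--         "cecd0be7-c8e0-451a-8314-f1d806db3bc1",
--         "1d37ba16-4d7b-4c1e-9650-1ee9b6a32666",
--         "abf811a3-26e8-48c2-bc86-e9b74ca0b385",
--         "a1342945-ce4b-480b-abb5-b74d43c41534",
--         "97a7c410-60c0-4d08-b554-4d1abb9092da",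
--         "71f88053-97c1-4928-93c3-8d83d714f27f",
--         "3a02a1a7-0322-4c0d-9700-8af9832f0f91",
--         "79b34e1c-8989-4984-816a-8e8f92b701f3",
--         "c4007411-1ba5-40f3-9b50-f25881c93f51",
--     ]),
--     "participants": (2016, [
--         "8e77cc9e-554e-4bfb-8772-9dc0b7d24608",
--         "7733be61-bca2-4ae8-8577-d948058df6c0",
--         "e40819ee-3a84-4205-b64e-4c67263ac237",
--         "7f23e4c6-9bee-4552-ba0c-a05be1f6ac62",
--         "eb1ddcf9-e358-4ceb-a4d7-e406a0a60d7e",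
--         "25883190-97ef-45a1-9b89-d15cc418a644",
--         "4b9317d7-8495-4621-966d-48e00639e2cb",
--         "7f4f7e75-8207-4ab1-9470-bcd0112653e9",
--         "0bba780e-5ae3-4701-ab16-8f804d5a3e57",
--         "4540cc38-0f5f-42a9-9749-3896c3da4488",
--         "a45acd54-2e8f-4fb5-b757-31654e875563",
--     ]),
--     "amendments": (2016, [
--         "792209b1-1465-41f9-b6e7-93878722c249",
--         "92e512ed-013b-4757-ba19-56662630f6e6",
--         "a1e67b0e-704a-4ca1-96dc-39c87d35c04e",
--         "d5e7494f-6f7f-42a9-9683-3c855f3d00a1",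
--         "3438f0eb-d7d2-4d0c-a1f2-e1d2420c848f",
--         "ec6da601-c7f6-466e-9bcb-4efea45dab36",
--         "4ad302df-c832-48e5-bd67-89d470ae43b3",
--         "25b0c081-49d9-4bea-9e5f-ecac3573d6cb",
--         "f8e2e074-e29e-409f-8fec-5d22c7b0bcd1",
--         "f7b96bf6-2af8-446a-a6ee-6022601fef7c",
--         "d9e4d487-1f1a-4b37-9735-e411708d7288",
--     ]),
--     "purchase_orders": (2010, [
--         "a8f9c39c-5a68-4848-a6c6-57625f205c45",
--         "8f3d230c-1bc7-40fa-b786-8b5ac89b8496",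
--         "2ef44ded-5080-4c93-90af-a9e605c470c4",
--         "c3d54b54-a2b4-4535-ac6a-40f264568648",
--         "9031948a-c906-4614-8274-6a62de1eeaf4",
--         "572a1153-371c-4a86-9cbe-a07b4a5a977a",
--         "4a32f248-feb9-4f54-9243-d4d98ea9d024",
--         "f50ac697-a3a1-453b-9fd0-c3ca16656092",
--         "e3be0379-c7bf-4439-9443-ffc9881f79af",
--         "227567af-fd4b-49df-8054-dba08676254e",
--         "d31fbf99-2708-4558-9c83-d16e69a70e08",
--         "bf623b89-ce86-4fc6-a2af-46c2c993074c",
--         "bad87d10-ef05-43fb-b9ba-9f0e7a761673",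
--         "d89f4745-77b0-47e4-9e8b-ec494dc3ad1b",
--         "11f08c38-50f7-47f3-a700-4f60cd09d943",
--         "226db975-8dc7-4f59-9f92-773ef9b58739",
--         "a63a9503-d7f1-4840-8e53-0346ed0513a9",
--     ]),
--     "deliveries": (2010, [
--         "cd17b62c-b7e5-416e-adcc-707e2b109a6f",
--         "bb62ce35-46eb-49ed-8e95-474d0918dd65",
--         "1c638795-cb24-4b57-a11a-124e48b274c0",
--         "cba668cc-2535-458a-ac21-9022f0ded50f",
--         "cdd75d59-407b-4e7e-b4a2-834db2ee00f8",
--         "cd1bd12c-7e52-40ee-b65b-66364a0c9120",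
--         "dc0f81fd-c48c-4740-b479-07b1218e7ef2",
--         "78ca35ae-8ce7-4593-97ac-faf8348a18af",
--         "7d152654-74c8-45af-a024-fdbd002fa706",
--         "addf3381-f57e-40a7-82e7-e228fb121367",
--         "fe5a1ee0-c228-46d8-9d2f-022d9aee1ae9",
--         "ead3e185-b006-45f5-ace9-4fb2fc3c15ad",
--         "99565544-1fd2-441d-b408-df33066a3867",
--         "b7cc1f82-10c7-45f1-ad22-d3339bf990ee",
--         "041097af-09c4-4ce6-b427-ad6921456c71",
--         "91f940ab-9132-40c0-aa8b-433ced22c17d",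
--         "c6aed1c6-94bc-4c83-936f-3c37648aca4b",
--     ]),
-- }
--
-- BUYERS_RESOURCE_ID = "08a09865-b831-462a-a5ce-226f9293ff3e"  # single file, no year split
--
--
-- def resolve_resource_ids(dataset: str, from_year: int, to_year: int) -> list[tuple[int, str]]:
--     """Return [(year, resource_id)] for the given year range.
--
--     The resources for each dataset cover one contiguous span of years, so the
--     table stores only the first year and the resource ids in year order; a
--     placeholder-free table makes the TODO filter unnecessary.
--     """
--     if dataset == "buyers":
--         return [(0, BUYERS_RESOURCE_ID)]
--     if dataset not in SPANS:
--         return []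
--     first, rids = SPANS[dataset]
--     return [(first + i, rid) for i, rid in enumerate(rids) if from_year <= first + i <= to_year]
-- ===== Notes on version B (the rewrite author's own statement) =====
-- stated objective: alternative
-- what changed: B replaces the year-keyed dicts and the sort-items-and-scan loop by a per-dataset (first_year, contiguous resource-id list) table: the answer is a comprehension over enumerate(rids) keeping offsets whose year falls in the range, with no dict of years, no sort, no year-0 skip and no TODO filter (the table stores no placeholders).
import Mathlib
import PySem

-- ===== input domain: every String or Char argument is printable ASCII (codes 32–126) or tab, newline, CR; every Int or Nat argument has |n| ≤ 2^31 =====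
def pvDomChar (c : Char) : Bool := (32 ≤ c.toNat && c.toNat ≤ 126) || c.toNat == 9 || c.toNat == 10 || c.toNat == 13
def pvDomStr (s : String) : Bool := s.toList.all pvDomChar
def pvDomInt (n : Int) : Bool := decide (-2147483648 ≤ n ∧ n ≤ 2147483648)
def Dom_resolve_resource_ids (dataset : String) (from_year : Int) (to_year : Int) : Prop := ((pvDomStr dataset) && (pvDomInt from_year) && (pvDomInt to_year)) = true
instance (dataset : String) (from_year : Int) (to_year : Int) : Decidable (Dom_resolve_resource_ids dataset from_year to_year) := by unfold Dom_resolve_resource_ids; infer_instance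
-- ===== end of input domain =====

-- B drops the year-keyed dicts for a per-dataset (first_year, contiguous resource-id list) table and
-- answers with one enumerate-and-filter comprehension (no sort, no year-0 skip, no TODO filter);
-- objective: alternative (not faster).

-- ===== PORT A =====
-- the module-level RESOURCE_IDS constant used by Python A
def pvRESOURCE_IDS : PySem.Dict String (PySem.Dict Int String) := PySem.Dict.mk [
  ("results", PySem.Dict.mk [(2018, "cecd0be7-c8e0-451a-8314-f1d806db3bc1"), (2019, "1d37ba16-4d7b-4c1e-9650-1ee9b6a32666"), (2020, "abf811a3-26e8-48c2-bc86-e9b74ca0b385"), (2021, "a1342945-ce4b-480b-abb5-b74d43c41534"), (2022, "97a7c410-60c0-4d08-b554-4d1abb9092da"), (2023, "71f88053-97c1-4928-93c3-8d83d714f27f"), (2024, "3a02a1a7-0322-4c0d-9700-8af9832f0f91"), (2025, "79b34e1c-8989-4984-816a-8e8f92b701f3"), (2026, "c4007411-1ba5-40f3-9b50-f25881c93f51")]),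
  ("participants", PySem.Dict.mk [(2016, "8e77cc9e-554e-4bfb-8772-9dc0b7d24608"), (2017, "7733be61-bca2-4ae8-8577-d948058df6c0"), (2018, "e40819ee-3a84-4205-b64e-4c67263ac237"), (2019, "7f23e4c6-9bee-4552-ba0c-a05be1f6ac62"), (2020, "eb1ddcf9-e358-4ceb-a4d7-e406a0a60d7e"), (2021, "25883190-97ef-45a1-9b89-d15cc418a644"), (2022, "4b9317d7-8495-4621-966d-48e00639e2cb"), (2023, "7f4f7e75-8207-4ab1-9470-bcd0112653e9"), (2024, "0bba780e-5ae3-4701-ab16-8f804d5a3e57"), (2025, "4540cc38-0f5f-42a9-9749-3896c3da4488"), (2026, "a45acd54-2e8f-4fb5-b757-31654e875563")]),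
  ("amendments", PySem.Dict.mk [(2016, "792209b1-1465-41f9-b6e7-93878722c249"), (2017, "92e512ed-013b-4757-ba19-56662630f6e6"), (2018, "a1e67b0e-704a-4ca1-96dc-39c87d35c04e"), (2019, "d5e7494f-6f7f-42a9-9683-3c855f3d00a1"), (2020, "3438f0eb-d7d2-4d0c-a1f2-e1d2420c848f"), (2021, "ec6da601-c7f6-466e-9bcb-4efea45dab36"), (2022, "4ad302df-c832-48e5-bd67-89d470ae43b3"), (2023, "25b0c081-49d9-4bea-9e5f-ecac3573d6cb"), (2024, "f8e2e074-e29e-409f-8fec-5d22c7b0bcd1"), (2025, "f7b96bf6-2af8-446a-a6ee-6022601fef7c"), (2026, "d9e4d487-1f1a-4b37-9735-e411708d7288")]),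
  ("purchase_orders", PySem.Dict.mk [(2010, "a8f9c39c-5a68-4848-a6c6-57625f205c45"), (2011, "8f3d230c-1bc7-40fa-b786-8b5ac89b8496"), (2012, "2ef44ded-5080-4c93-90af-a9e605c470c4"), (2013, "c3d54b54-a2b4-4535-ac6a-40f264568648"), (2014, "9031948a-c906-4614-8274-6a62de1eeaf4"), (2015, "572a1153-371c-4a86-9cbe-a07b4a5a977a"), (2016, "4a32f248-feb9-4f54-9243-d4d98ea9d024"), (2017, "f50ac697-a3a1-453b-9fd0-c3ca16656092"), (2018, "e3be0379-c7bf-4439-9443-ffc9881f79af"), (2019, "227567af-fd4b-49df-8054-dba08676254e"), (2020, "d31fbf99-2708-4558-9c83-d16e69a70e08"), (2021, "bf623b89-ce86-4fc6-a2af-46c2c993074c"), (2022, "bad87d10-ef05-43fb-b9ba-9f0e7a761673"), (2023, "d89f4745-77b0-47e4-9e8b-ec494dc3ad1b"), (2024, "11f08c38-50f7-47f3-a700-4f60cd09d943"), (2025, "226db975-8dc7-4f59-9f92-773ef9b58739"), (2026, "a63a9503-d7f1-4840-8e53-0346ed0513a9")]),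
  ("deliveries", PySem.Dict.mk [(2010, "cd17b62c-b7e5-416e-adcc-707e2b109a6f"), (2011, "bb62ce35-46eb-49ed-8e95-474d0918dd65"), (2012, "1c638795-cb24-4b57-a11a-124e48b274c0"), (2013, "cba668cc-2535-458a-ac21-9022f0ded50f"), (2014, "cdd75d59-407b-4e7e-b4a2-834db2ee00f8"), (2015, "cd1bd12c-7e52-40ee-b65b-66364a0c9120"), (2016, "dc0f81fd-c48c-4740-b479-07b1218e7ef2"), (2017, "78ca35ae-8ce7-4593-97ac-faf8348a18af"), (2018, "7d152654-74c8-45af-a024-fdbd002fa706"), (2019, "addf3381-f57e-40a7-82e7-e228fb121367"), (2020, "fe5a1ee0-c228-46d8-9d2f-022d9aee1ae9"), (2021, "ead3e185-b006-45f5-ace9-4fb2fc3c15ad"), (2022, "99565544-1fd2-441d-b408-df33066a3867"), (2023, "b7cc1f82-10c7-45f1-ad22-d3339bf990ee"), (2024, "041097af-09c4-4ce6-b427-ad6921456c71"), (2025, "91f940ab-9132-40c0-aa8b-433ced22c17d"), (2026, "c6aed1c6-94bc-4c83-936f-3c37648aca4b")]),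
  ("buyers", PySem.Dict.mk [(0, "08a09865-b831-462a-a5ce-226f9293ff3e")])]

def resolve_resource_ids (dataset : String) (from_year : Int) (to_year : Int) : List (Int × String) :=
  let mapping := PySem.Dict.getD pvRESOURCE_IDS dataset (PySem.Dict.mk [])
  if dataset == "buyers" then
    -- mapping[0]: exact here — this branch is reached only with dataset = "buyers", whose dict has key 0
    [(0, PySem.Dict.getD mapping 0 "")]
  else
    (PySem.List.sorted2 mapping.items (fun p => p.1) (fun p => p.2) false).foldl
      (fun acc p =>
        if p.1 = 0 then acc
        else if from_year ≤ p.1 ∧ p.1 ≤ to_year ∧ ¬ (PySem.Str.startswith p.2 "TODO" = true) then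
          acc ++ [p]
        else acc) []

-- ===== PORT B =====
-- B's own data table: first year and the resource ids of the contiguous span, in year order
def pvSPANS : PySem.Dict String (Int × List String) := PySem.Dict.mk [
  ("results", (2018, ["cecd0be7-c8e0-451a-8314-f1d806db3bc1", "1d37ba16-4d7b-4c1e-9650-1ee9b6a32666", "abf811a3-26e8-48c2-bc86-e9b74ca0b385", "a1342945-ce4b-480b-abb5-b74d43c41534", "97a7c410-60c0-4d08-b554-4d1abb9092da", "71f88053-97c1-4928-93c3-8d83d714f27f", "3a02a1a7-0322-4c0d-9700-8af9832f0f91", "79b34e1c-8989-4984-816a-8e8f92b701f3", "c4007411-1ba5-40f3-9b50-f25881c93f51"])),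
  ("participants", (2016, ["8e77cc9e-554e-4bfb-8772-9dc0b7d24608", "7733be61-bca2-4ae8-8577-d948058df6c0", "e40819ee-3a84-4205-b64e-4c67263ac237", "7f23e4c6-9bee-4552-ba0c-a05be1f6ac62", "eb1ddcf9-e358-4ceb-a4d7-e406a0a60d7e", "25883190-97ef-45a1-9b89-d15cc418a644", "4b9317d7-8495-4621-966d-48e00639e2cb", "7f4f7e75-8207-4ab1-9470-bcd0112653e9", "0bba780e-5ae3-4701-ab16-8f804d5a3e57", "4540cc38-0f5f-42a9-9749-3896c3da4488", "a45acd54-2e8f-4fb5-b757-31654e875563"])),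
  ("amendments", (2016, ["792209b1-1465-41f9-b6e7-93878722c249", "92e512ed-013b-4757-ba19-56662630f6e6", "a1e67b0e-704a-4ca1-96dc-39c87d35c04e", "d5e7494f-6f7f-42a9-9683-3c855f3d00a1", "3438f0eb-d7d2-4d0c-a1f2-e1d2420c848f", "ec6da601-c7f6-466e-9bcb-4efea45dab36", "4ad302df-c832-48e5-bd67-89d470ae43b3", "25b0c081-49d9-4bea-9e5f-ecac3573d6cb", "f8e2e074-e29e-409f-8fec-5d22c7b0bcd1", "f7b96bf6-2af8-446a-a6ee-6022601fef7c", "d9e4d487-1f1a-4b37-9735-e411708d7288"])),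
  ("purchase_orders", (2010, ["a8f9c39c-5a68-4848-a6c6-57625f205c45", "8f3d230c-1bc7-40fa-b786-8b5ac89b8496", "2ef44ded-5080-4c93-90af-a9e605c470c4", "c3d54b54-a2b4-4535-ac6a-40f264568648", "9031948a-c906-4614-8274-6a62de1eeaf4", "572a1153-371c-4a86-9cbe-a07b4a5a977a", "4a32f248-feb9-4f54-9243-d4d98ea9d024", "f50ac697-a3a1-453b-9fd0-c3ca16656092", "e3be0379-c7bf-4439-9443-ffc9881f79af", "227567af-fd4b-49df-8054-dba08676254e", "d31fbf99-2708-4558-9c83-d16e69a70e08", "bf623b89-ce86-4fc6-a2af-46c2c993074c", "bad87d10-ef05-43fb-b9ba-9f0e7a761673", "d89f4745-77b0-47e4-9e8b-ec494dc3ad1b", "11f08c38-50f7-47f3-a700-4f60cd09d943", "226db975-8dc7-4f59-9f92-773ef9b58739", "a63a9503-d7f1-4840-8e53-0346ed0513a9"])),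
  ("deliveries", (2010, ["cd17b62c-b7e5-416e-adcc-707e2b109a6f", "bb62ce35-46eb-49ed-8e95-474d0918dd65", "1c638795-cb24-4b57-a11a-124e48b274c0", "cba668cc-2535-458a-ac21-9022f0ded50f", "cdd75d59-407b-4e7e-b4a2-834db2ee00f8", "cd1bd12c-7e52-40ee-b65b-66364a0c9120", "dc0f81fd-c48c-4740-b479-07b1218e7ef2", "78ca35ae-8ce7-4593-97ac-faf8348a18af", "7d152654-74c8-45af-a024-fdbd002fa706", "addf3381-f57e-40a7-82e7-e228fb121367", "fe5a1ee0-c228-46d8-9d2f-022d9aee1ae9", "ead3e185-b006-45f5-ace9-4fb2fc3c15ad", "99565544-1fd2-441d-b408-df33066a3867", "b7cc1f82-10c7-45f1-ad22-d3339bf990ee", "041097af-09c4-4ce6-b427-ad6921456c71", "91f940ab-9132-40c0-aa8b-433ced22c17d", "c6aed1c6-94bc-4c83-936f-3c37648aca4b"]))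
]

def pvBUYERS_RESOURCE_ID : String := "08a09865-b831-462a-a5ce-226f9293ff3e"

def resolve_resource_ids_alt (dataset : String) (from_year : Int) (to_year : Int) : List (Int × String) :=
  if dataset == "buyers" then
    [(0, pvBUYERS_RESOURCE_ID)]
  else
    -- 'if dataset not in SPANS: return []' + the tuple unpacking, as one match on the lookup
    match PySem.Dict.get? pvSPANS dataset with
    | none => []
    | some (first, rids) =>
      -- the comprehension: filter enumerate(rids) by the year test, then build the pairs
      ((PySem.List.enumerate rids).filter
          (fun p => decide (from_year ≤ first + p.1 ∧ first + p.1 ≤ to_year))).map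
        (fun p => (first + p.1, p.2))

-- ===== PRECONDITION & SPEC =====
def Spec_resolve_resource_ids (dataset : String) (from_year : Int) (to_year : Int) (out : List (Int × String)) : Prop := out = resolve_resource_ids_alt dataset from_year to_year
instance (dataset : String) (from_year : Int) (to_year : Int) (out : List (Int × String)) : Decidable (Spec_resolve_resource_ids dataset from_year to_year out) := by unfold Spec_resolve_resource_ids; infer_instance

-- ===== CLAIM =====
def Claim_equal_resolve_resource_ids : Prop := ∀ (dataset : String) (from_year : Int) (to_year : Int), Dom_resolve_resource_ids dataset from_year to_year → Spec_resolve_resource_ids dataset from_year to_year (resolve_resource_ids dataset from_year to_year)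

-- ===== LEMMAS AND PROOFS =====

-- one non-"buyers" dataset; the literal side conditions are discharged by decide/rfl at the use site
lemma pvPerDict (ds : String) (f t : Int) (l : List (Int × String)) (first : Int) (rids : List String)
    (hds : (ds == "buyers") = false)
    (hm : PySem.Dict.getD pvRESOURCE_IDS ds (PySem.Dict.mk []) = PySem.Dict.mk l)
    (hsor : PySem.List.sorted2 l (fun p => p.1) (fun p => p.2) false = l)
    (hspan : PySem.Dict.get? pvSPANS ds = some (first, rids))
    (henc : l = (PySem.List.enumerate rids).map (fun p => (first + p.1, p.2)))
    (hk : ∀ p ∈ l, p.1 ≠ 0 ∧ PySem.Str.startswith p.2 "TODO" = false) :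
    resolve_resource_ids ds f t = resolve_resource_ids_alt ds f t := by
  unfold resolve_resource_ids resolve_resource_ids_alt
  simp only [hds, Bool.false_eq_true, if_false, hspan, hm]
  rw [hsor]
  have hbody : (fun (acc : List (Int × String)) (p : Int × String) =>
        if p.1 = 0 then acc
        else if f ≤ p.1 ∧ p.1 ≤ t ∧ ¬ (PySem.Str.startswith p.2 "TODO" = true) then acc ++ [p]
        else acc)
      = (fun acc p =>
        if ¬ p.1 = 0 ∧ f ≤ p.1 ∧ p.1 ≤ t ∧ ¬ (PySem.Str.startswith p.2 "TODO" = true) then acc ++ [p]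
        else acc) := by
    funext acc p
    split_ifs <;> tauto
  rw [hbody, PySem.List.foldl_append_ite_eq_filter, List.nil_append]
  have hfc : l.filter (fun p => decide (¬ p.1 = 0 ∧ f ≤ p.1 ∧ p.1 ≤ t ∧ ¬ (PySem.Str.startswith p.2 "TODO" = true)))
      = l.filter (fun p => decide (f ≤ p.1 ∧ p.1 ≤ t)) := by
    apply List.filter_congr
    intro p hp
    obtain ⟨h1, h2⟩ := hk p hp
    have h2' : PySem.Chars.startswith p.2.toList ['T', 'O', 'D', 'O'] = false := h2
    simp [h1, h2']
  rw [hfc, henc, List.filter_map]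
  rfl

-- ===== VERDICT (by name: the statement is the Claim_ definition above) =====
theorem resolve_resource_ids_spec : Claim_equal_resolve_resource_ids := by
  intro ds f t _
  unfold Spec_resolve_resource_ids
  by_cases h0 : ds = "buyers"
  · subst h0; rfl
  by_cases h1 : ds = "results"
  · subst h1
    exact pvPerDict _ f t _ 2018 _ (by decide) rfl (by decide) rfl (by decide) (by decide)
  by_cases h2 : ds = "participants"
  · subst h2
    exact pvPerDict _ f t _ 2016 _ (by decide) rfl (by decide) rfl (by decide) (by decide)
  by_cases h3 : ds = "amendments"
  · subst h3
    exact pvPerDict _ f t _ 2016 _ (by decide) rfl (by decide) rfl (by decide) (by decide)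
  by_cases h4 : ds = "purchase_orders"
  · subst h4
    exact pvPerDict _ f t _ 2010 _ (by decide) rfl (by decide) rfl (by decide) (by decide)
  by_cases h5 : ds = "deliveries"
  · subst h5
    exact pvPerDict _ f t _ 2010 _ (by decide) rfl (by decide) rfl (by decide) (by decide)
  -- unknown dataset: both lookups miss and both programs return []
  have e1 : ("results" == ds) = false := beq_eq_false_iff_ne.mpr (Ne.symm h1)
  have e2 : ("participants" == ds) = false := beq_eq_false_iff_ne.mpr (Ne.symm h2)
  have e3 : ("amendments" == ds) = false := beq_eq_false_iff_ne.mpr (Ne.symm h3)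
  have e4 : ("purchase_orders" == ds) = false := beq_eq_false_iff_ne.mpr (Ne.symm h4)
  have e5 : ("deliveries" == ds) = false := beq_eq_false_iff_ne.mpr (Ne.symm h5)
  have e6 : ("buyers" == ds) = false := beq_eq_false_iff_ne.mpr (Ne.symm h0)
  have e7 : (ds == "buyers") = false := beq_eq_false_iff_ne.mpr h0
  have hm : PySem.Dict.getD pvRESOURCE_IDS ds (PySem.Dict.mk []) = PySem.Dict.mk [] := by
    rw [PySem.Dict.getD_eq_get?_getD]
    unfold pvRESOURCE_IDS
    simp only [PySem.Dict.get?_mk_cons, e1, e2, e3, e4, e5, e6, Bool.false_eq_true, if_false]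
    rfl
  have hsp : PySem.Dict.get? pvSPANS ds = none := by
    unfold pvSPANS
    simp only [PySem.Dict.get?_mk_cons, e1, e2, e3, e4, e5, Bool.false_eq_true, if_false]
    rfl
  unfold resolve_resource_ids resolve_resource_ids_alt
  simp only [hm, e7, Bool.false_eq_true, if_false, hsp]
  rfl
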